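-- pv_equiv track=rewrite | github.com/eugenebireta/biretos-automation | scripts/supervisor/packets.py | reduce_packet_state
-- ===== SOURCE A (Python) =====
-- from typing import Any
--
-- def reduce_packet_state(events: list[dict[str, Any]]) -> dict[str, dict[str, Any]]:
--     state: dict[str, dict[str, Any]] = {}
--     for event in events:
--         packet_id = str(event.get("packet_id") or "").strip()
--         if not packet_id:
--             continue
--         current = dict(state.get(packet_id) or {})
--         current.update(event)
--         state[packet_id] = current
--     return state
-- ===== SOURCE B (Python) =====
-- from typing import Any
--
-- def _merged(group: list[dict[str, Any]]) -> dict[str, Any]: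
--     merged: dict[str, Any] = {}
--     for event in group:
--         merged.update(event)
--     return merged
--
-- def reduce_packet_state(events: list[dict[str, Any]]) -> dict[str, dict[str, Any]]:
--     groups: dict[str, list[dict[str, Any]]] = {}
--     for event in events:
--         packet_id = str(event.get("packet_id") or "").strip()
--         if packet_id:
--             groups.setdefault(packet_id, []).append(event)
--     return {pid: _merged(group) for pid, group in groups.items()}
-- ===== Notes on version B (the rewrite author's own statement) =====
-- stated objective: alternative
-- what changed: Replaces A's single interleaved pass that updates the state dict per event with a two-pass shape: first group events by their non-blank packet_id (insertion order preserved), then merge each group into its packet's state dict.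
import Mathlib
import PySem

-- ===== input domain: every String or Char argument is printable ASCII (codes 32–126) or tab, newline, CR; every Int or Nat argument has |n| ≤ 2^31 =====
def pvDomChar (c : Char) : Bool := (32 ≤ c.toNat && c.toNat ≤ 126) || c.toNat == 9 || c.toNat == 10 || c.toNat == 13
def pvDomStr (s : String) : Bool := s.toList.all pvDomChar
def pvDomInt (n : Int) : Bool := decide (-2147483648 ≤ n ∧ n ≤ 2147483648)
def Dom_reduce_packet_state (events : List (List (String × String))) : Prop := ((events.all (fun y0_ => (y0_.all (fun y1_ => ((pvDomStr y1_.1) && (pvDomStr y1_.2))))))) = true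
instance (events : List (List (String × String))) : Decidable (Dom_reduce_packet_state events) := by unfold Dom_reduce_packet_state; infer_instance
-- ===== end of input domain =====

-- B replaces A's single interleaved accumulate pass by two passes (group events per packet id,
-- then merge each group); same asymptotic cost — objective: alternative decomposition.

-- shared helper, the same source expression in both Pythons:
-- str(event.get("packet_id") or "").strip()   (dict lookup = first match; missing and "" both give "")
def pyPacketId (event : List (String × String)) : String :=
  PySem.Str.strip (((event.find? (fun p => p.1 == "packet_id")).map Prod.snd).getD "")

-- ===== PORT A =====
def reduce_packet_state (events : List (List (String × String))) : List (String × List (String × String)) :=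
  (events.foldl
    (fun (state : PySem.Dict String (PySem.Dict String String)) event =>
      let packet_id := pyPacketId event
      if packet_id == "" then state
      else
        -- current = dict(state.get(packet_id) or {}); current.update(event)
        let current := PySem.Dict.update ((PySem.Dict.get? state packet_id).getD PySem.Dict.empty) event
        PySem.Dict.insert state packet_id current)
    PySem.Dict.empty).items.map (fun p => (p.1, p.2.items))

-- ===== PORT B =====
-- helper _merged: merged = {}; for event in group: merged.update(event)
def pvMerged (group : List (List (String × String))) : PySem.Dict String String :=
  group.foldl (fun merged event => PySem.Dict.update merged event) PySem.Dict.empty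

def reduce_packet_state_alt (events : List (List (String × String))) : List (String × List (String × String)) :=
  let groups : PySem.Dict String (List (List (String × String))) :=
    events.foldl
      (fun groups event =>
        let packet_id := pyPacketId event
        if packet_id == "" then groups
        else PySem.Dict.modify groups packet_id [] (· ++ [event]))  -- groups.setdefault(pid, []).append(event)
      PySem.Dict.empty
  -- the comprehension's keys (keys of groups) are pairwise distinct, so it appends each pair fresh:
  -- its items are exactly this map over groups.items
  groups.items.map (fun p => (p.1, (pvMerged p.2).items))

-- ===== PRECONDITION & SPEC =====
def Spec_reduce_packet_state (events : List (List (String × String))) (out : List (String × List (String × String))) : Prop := out = reduce_packet_state_alt events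
instance (events : List (List (String × String))) (out : List (String × List (String × String))) : Decidable (Spec_reduce_packet_state events out) := by unfold Spec_reduce_packet_state; infer_instance

-- ===== CLAIM (what is proved, stated in full; the proofs are below) =====
def Claim_equal_reduce_packet_state : Prop := ∀ (events : List (List (String × String))), Dom_reduce_packet_state events → Spec_reduce_packet_state events (reduce_packet_state events)

-- ===== LEMMAS AND PROOFS =====

-- map pvMerged over the values of a group dictionary
def pvMapVals (g : PySem.Dict String (List (List (String × String)))) :
    PySem.Dict String (PySem.Dict String String) :=
  PySem.Dict.mk (g.items.map (fun p => (p.1, pvMerged p.2)))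

lemma pv_contains_mapVals (g : PySem.Dict String (List (List (String × String)))) (k : String) :
    (pvMapVals g).contains k = g.contains k := by
  simp only [pvMapVals, PySem.Dict.contains, List.any_map]
  congr 1

lemma pv_get?_mapVals (g : PySem.Dict String (List (List (String × String)))) (k : String) :
    (pvMapVals g).get? k = (g.get? k).map pvMerged := by
  simp only [pvMapVals, PySem.Dict.get?, List.find?_map, Option.map_map]
  rfl

lemma pv_mapVals_insert (g : PySem.Dict String (List (List (String × String)))) (k : String)
    (v : List (List (String × String))) :
    pvMapVals (g.insert k v) = (pvMapVals g).insert k (pvMerged v) := by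
  apply PySem.Dict.ext
  show ((g.insert k v).items).map (fun p => (p.1, pvMerged p.2))
      = ((pvMapVals g).insert k (pvMerged v)).items
  rw [PySem.Dict.items_insert, PySem.Dict.items_insert, pv_contains_mapVals]
  by_cases h : g.contains k = true
  · simp only [h, if_true, List.map_map, pvMapVals]
    apply List.map_congr_left
    intro p _
    by_cases hp : p.1 = k
    · simp [hp, Function.comp]
    · simp [hp, Function.comp]
  · simp [h, pvMapVals]

lemma pv_merged_append (l : List (List (String × String))) (e : List (String × String)) :
    pvMerged (l ++ [e]) = PySem.Dict.update (pvMerged l) e := by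
  simp [pvMerged, List.foldl_append]

lemma pv_getD_mapVals (g : PySem.Dict String (List (List (String × String)))) (k : String) :
    ((pvMapVals g).get? k).getD PySem.Dict.empty = pvMerged (g.getD k []) := by
  rw [pv_get?_mapVals]
  cases h : g.get? k with
  | none => simp [PySem.Dict.getD, h, pvMerged]
  | some l => simp [PySem.Dict.getD, h]

lemma pv_step (g : PySem.Dict String (List (List (String × String)))) (k : String)
    (e : List (String × String)) :
    pvMapVals (PySem.Dict.modify g k [] (· ++ [e]))
      = (pvMapVals g).insert k
          (PySem.Dict.update (((pvMapVals g).get? k).getD PySem.Dict.empty) e) := by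
  rw [pv_getD_mapVals, ← pv_merged_append]
  simp only [PySem.Dict.modify, pv_mapVals_insert]

lemma pv_main (events : List (List (String × String))) :
    ∀ (g : PySem.Dict String (List (List (String × String)))),
      events.foldl
        (fun (state : PySem.Dict String (PySem.Dict String String)) event =>
          let packet_id := pyPacketId event
          if packet_id == "" then state
          else
            let current := PySem.Dict.update ((PySem.Dict.get? state packet_id).getD PySem.Dict.empty) event
            PySem.Dict.insert state packet_id current)
        (pvMapVals g)
      = pvMapVals
          (events.foldl
            (fun groups event =>
              let packet_id := pyPacketId event
              if packet_id == "" then groups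
              else PySem.Dict.modify groups packet_id [] (· ++ [event]))
            g) := by
  induction events with
  | nil => intro g; rfl
  | cons e rest ih =>
    intro g
    simp only [List.foldl_cons]
    by_cases h : pyPacketId e == ""
    · simp only [h, if_true]
      exact ih g
    · simp only [h, Bool.false_eq_true, if_false, ← pv_step]
      exact ih _

-- ===== VERDICT (by name: the statement is the Claim_ definition above) =====
theorem reduce_packet_state_spec : Claim_equal_reduce_packet_state := by
  intro events _
  unfold Spec_reduce_packet_state reduce_packet_state reduce_packet_state_alt
  have h := pv_main events PySem.Dict.empty
  rw [show pvMapVals PySem.Dict.empty = (PySem.Dict.empty : PySem.Dict String (PySem.Dict String String)) from rfl] at h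
  rw [h]
  simp only [pvMapVals, List.map_map]
  rfl
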